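-- pv_equiv track=rewrite | github.com/systems-biology-lirui/Project_colorieeg_2026 | testcode/task1_paired_decoding/common.py | _match_pair_positions
-- ===== SOURCE A (Python) =====
-- def _match_pair_positions(color_ids, gray_ids):
--     gray_positions = {}
--     for gray_idx, sample_id in enumerate(gray_ids):
--         gray_positions.setdefault(sample_id, []).append(gray_idx)
--
--     color_seen = {}
--     matches = []
--     for color_idx, sample_id in enumerate(color_ids):
--         occurrence_rank = color_seen.get(sample_id, 0)
--         color_seen[sample_id] = occurrence_rank + 1
--         gray_candidates = gray_positions.get(sample_id, [])
--         if occurrence_rank < len(gray_candidates):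
--             matches.append((sample_id, occurrence_rank, color_idx, gray_candidates[occurrence_rank]))
--     return matches
-- ===== SOURCE B (Python) =====
-- def _match_pair_positions(color_ids, gray_ids):
--     color_positions = {}
--     for color_idx, sample_id in enumerate(color_ids):
--         color_positions.setdefault(sample_id, []).append(color_idx)
--     gray_positions = {}
--     for gray_idx, sample_id in enumerate(gray_ids):
--         gray_positions.setdefault(sample_id, []).append(gray_idx)
--     matches = []
--     for sample_id, color_list in color_positions.items():
--         gray_list = gray_positions.get(sample_id, [])
--         for rank, (color_idx, gray_idx) in enumerate(zip(color_list, gray_list)):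
--             matches.append((sample_id, rank, color_idx, gray_idx))
--     matches.sort(key=lambda m: m[2])
--     return matches
-- ===== Notes on version B (the rewrite author's own statement) =====
-- stated objective: alternative
-- what changed: Replaces A's single streaming pass with a running per-id rank counter by a group-then-zip-then-sort decomposition: indices are grouped by sample_id for both lists, each color group is zipped against its gray group (zip truncation realises the rank cutoff), and the result is sorted by color index to restore appearance order.
import Mathlib
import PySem

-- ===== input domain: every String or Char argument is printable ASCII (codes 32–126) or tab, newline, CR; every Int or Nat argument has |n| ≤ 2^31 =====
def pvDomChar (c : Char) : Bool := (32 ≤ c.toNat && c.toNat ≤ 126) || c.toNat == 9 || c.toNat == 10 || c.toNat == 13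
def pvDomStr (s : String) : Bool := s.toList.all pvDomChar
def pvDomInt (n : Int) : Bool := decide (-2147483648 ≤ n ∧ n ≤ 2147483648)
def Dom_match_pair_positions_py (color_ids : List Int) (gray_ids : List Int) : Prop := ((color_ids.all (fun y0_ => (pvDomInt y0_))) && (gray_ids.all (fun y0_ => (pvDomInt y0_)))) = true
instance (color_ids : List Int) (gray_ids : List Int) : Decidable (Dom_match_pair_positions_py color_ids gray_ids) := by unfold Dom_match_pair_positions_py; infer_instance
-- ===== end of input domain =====

-- B replaces A's streaming pass (running per-id rank counter) by group-by-id, zip color/gray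
-- position lists, then sort by color index: an alternative decomposition of the same matching.


-- ===== PORT A =====
-- 'gray_positions.setdefault(sid, []).append(i)' net effect: d[sid] = d.get(sid, []) + [i] (Dict.modify)
def stepA (gray_positions : PySem.Dict Int (List Int))
    (st : PySem.Dict Int Int × List (Int × Int × Int × Int)) (p : Int × Int) :
    PySem.Dict Int Int × List (Int × Int × Int × Int) :=
  let occurrence_rank := st.1.getD p.2 0
  let color_seen := st.1.insert p.2 (occurrence_rank + 1)
  let gray_candidates := gray_positions.getD p.2 []
  if occurrence_rank < (gray_candidates.length : Int) then
    (color_seen, st.2 ++ [(p.2, occurrence_rank, p.1, PySem.List.pyGetD gray_candidates occurrence_rank 0)])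
  else
    (color_seen, st.2)

def match_pair_positions_py (color_ids : List Int) (gray_ids : List Int) : List (Int × Int × Int × Int) :=
  let gray_positions : PySem.Dict Int (List Int) :=
    (PySem.List.enumerate gray_ids 0).foldl (fun d p => d.modify p.2 [] (· ++ [p.1])) PySem.Dict.empty
  ((PySem.List.enumerate color_ids 0).foldl (stepA gray_positions) (PySem.Dict.empty, [])).2

-- ===== PORT B =====
-- the two grouping loops of Source B ('positions.setdefault(sid, []).append(idx)')
def groupPositions (ids : List Int) : PySem.Dict Int (List Int) :=
  (PySem.List.enumerate ids 0).foldl (fun d p => d.modify p.2 [] (· ++ [p.1])) PySem.Dict.empty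

def match_pair_positions_py_alt (color_ids : List Int) (gray_ids : List Int) : List (Int × Int × Int × Int) :=
  let color_positions := groupPositions color_ids
  let gray_positions := groupPositions gray_ids
  let out_ :=
    color_positions.items.foldl (fun acc pr =>
      let gray_list := gray_positions.getD pr.1 []
      acc ++ (PySem.List.enumerate (pr.2.zip gray_list) 0).map (fun q => (pr.1, q.1, q.2.1, q.2.2))) []
  PySem.List.sorted out_ (fun m => m.2.2.1) false

-- ===== PRECONDITION & SPEC =====
def Spec_match_pair_positions_py (color_ids : List Int) (gray_ids : List Int) (out : List (Int × Int × Int × Int)) : Prop := out = match_pair_positions_py_alt color_ids gray_ids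
instance (color_ids : List Int) (gray_ids : List Int) (out : List (Int × Int × Int × Int)) : Decidable (Spec_match_pair_positions_py color_ids gray_ids out) := by unfold Spec_match_pair_positions_py; infer_instance

-- ===== CLAIM (what is proved, stated in full; the proofs are below) =====
def Claim_equal_match_pair_positions_py : Prop := ∀ (color_ids : List Int) (gray_ids : List Int), Dom_match_pair_positions_py color_ids gray_ids → Spec_match_pair_positions_py color_ids gray_ids (match_pair_positions_py color_ids gray_ids)

-- ===== LEMMAS AND PROOFS =====

-- positions of value c in ids, in order (what both grouping dicts store at key c)
def posOf (ids : List Int) (c : Int) : List Int :=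
  ((PySem.List.enumerate ids 0).filter (fun p => p.2 == c)).map (·.1)

-- the (at most one) match contributed by appending occurrence x to color prefix cs
def entOpt (cs gs : List Int) (x : Int) : List (Int × Int × Int × Int) :=
  let g := posOf gs x
  if cs.count x < g.length then
    [(x, (cs.count x : Int), (cs.length : Int), g.getD (cs.count x) 0)]
  else []

-- B's unsorted accumulated list
def unsortedB (cs gs : List Int) : List (Int × Int × Int × Int) :=
  (PySem.Set.ofList cs).flatMap (fun sid =>
    (PySem.List.enumerate ((posOf cs sid).zip (posOf gs sid)) 0).map (fun q => (sid, q.1, q.2.1, q.2.2)))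

lemma group_getD (ids : List Int) (c : Int) : (groupPositions ids).getD c [] = posOf ids c := by
  unfold groupPositions posOf
  have hswap : ∀ (l : List (Int × Int)) (d : PySem.Dict Int (List Int)),
      l.foldl (fun d p => d.modify p.2 [] (· ++ [p.1])) d
        = (l.map (fun p => (p.2, p.1))).foldl (fun d q => d.modify q.1 [] (· ++ [q.2])) d := by
    intro l d; rw [List.foldl_map]
  rw [hswap, PySem.Dict.getD_foldl_modify_append, List.filter_map, List.map_map]
  rfl

lemma posOf_length (ids : List Int) (c : Int) : (posOf ids c).length = ids.count c := by
  unfold posOf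
  rw [List.length_map, ← List.countP_eq_length_filter]
  have h := List.countP_map (p := fun v : Int => v == c) (f := fun p : Int × Int => p.2)
    (l := PySem.List.enumerate ids 0)
  rw [PySem.List.map_snd_enumerate] at h
  simp only [Function.comp_def] at h
  rw [← h]
  rfl

lemma posOf_append_singleton (ids : List Int) (x c : Int) :
    posOf (ids ++ [x]) c = posOf ids c ++ (if x = c then [(ids.length : Int)] else []) := by
  unfold posOf
  rw [PySem.List.enumerate_append, List.filter_append, List.map_append]
  congr 1
  by_cases h : x = c <;>
    simp [PySem.List.enumerate_cons, PySem.List.enumerate_nil, h, List.filter]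

lemma posOf_of_not_mem (ids : List Int) (c : Int) (h : c ∉ ids) : posOf ids c = [] := by
  unfold posOf
  rw [List.map_eq_nil_iff, List.filter_eq_nil_iff]
  intro p hp
  rcases (PySem.List.mem_enumerate_iff _ _ _).1 hp with ⟨k, hk, rfl⟩
  simp only [beq_iff_eq]
  intro hc
  exact h (hc ▸ List.getElem_mem hk)

lemma zip_append_singleton {α β : Type} [Inhabited β] (l : List α) (a : α) (g : List β) :
    (l ++ [a]).zip g = l.zip g ++ (if l.length < g.length then [(a, g.getD l.length default)] else []) := by
  induction l generalizing g with
  | nil => cases g <;> simp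
  | cons y ys ih =>
    cases g with
    | nil => simp
    | cons b bs => simp [List.zip_cons_cons, ih bs]

lemma seen_invariant (g : PySem.Dict Int (List Int)) (xs : List Int) (s : Int)
    (d : PySem.Dict Int Int) (acc : List (Int × Int × Int × Int)) (c : Int) :
    ((PySem.List.enumerate xs s).foldl (stepA g) (d, acc)).1.getD c 0 = d.getD c 0 + xs.count c := by
  induction xs generalizing s d acc with
  | nil => simp [PySem.List.enumerate_nil]
  | cons y ys ih =>
    rw [PySem.List.enumerate_cons, List.foldl_cons]
    have hstep : stepA g (d, acc) (s, y)
        = (d.insert y (d.getD y 0 + 1), (stepA g (d, acc) (s, y)).2) := by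
      simp only [stepA]
      split <;> rfl
    rw [hstep, ih, PySem.Dict.getD_insert]
    by_cases hc : c = y <;> simp [hc, List.count_cons] <;> omega

lemma A_append_singleton (xs gs : List Int) (x : Int) :
    match_pair_positions_py (xs ++ [x]) gs = match_pair_positions_py xs gs ++ entOpt xs gs x := by
  simp only [match_pair_positions_py]
  rw [PySem.List.enumerate_append, List.foldl_append, PySem.List.enumerate_cons,
    PySem.List.enumerate_nil, List.foldl_cons, List.foldl_nil]
  set G := (PySem.List.enumerate gs 0).foldl
      (fun d p => d.modify p.2 [] (· ++ [p.1])) PySem.Dict.empty with hGdef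
  have hr : (List.foldl (stepA G) (PySem.Dict.empty, ([] : List (Int × Int × Int × Int)))
      (PySem.List.enumerate xs 0)).1.getD x 0 = (xs.count x : Int) := by
    rw [seen_invariant]; simp
  have hG : G.getD x [] = posOf gs x := group_getD gs x
  simp only [stepA, entOpt, hr, hG]
  split_ifs with h1 h2 h2
  · simp [PySem.List.pyGetD]
  · exact absurd (by exact_mod_cast h1) h2
  · exact absurd (by exact_mod_cast h2) h1
  · simp

lemma A_idx_bound (xs gs : List Int) (e : Int × Int × Int × Int)
    (he : e ∈ match_pair_positions_py xs gs) : e.2.2.1 < (xs.length : Int) := by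
  induction xs using List.reverseRecOn with
  | nil => simp [match_pair_positions_py, PySem.List.enumerate_nil] at he
  | append_singleton ys y ih =>
    rw [A_append_singleton] at he
    rcases List.mem_append.1 he with h | h
    · have := ih h
      simp only [List.length_append, List.length_cons, List.length_nil]
      push_cast
      omega
    · simp only [entOpt] at h
      split at h
      · rcases List.mem_singleton.1 h with rfl
        simp only [List.length_append, List.length_cons, List.length_nil]
        push_cast
        omega
      · simp at h

lemma A_pairwise (xs gs : List Int) :
    (match_pair_positions_py xs gs).Pairwise (fun a b => a.2.2.1 < b.2.2.1) := by
  induction xs using List.reverseRecOn with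
  | nil => simp [match_pair_positions_py, PySem.List.enumerate_nil]
  | append_singleton ys y ih =>
    rw [A_append_singleton, List.pairwise_append]
    refine ⟨ih, ?_, ?_⟩
    · simp only [entOpt]
      split <;> simp
    · intro a ha b hb
      have hbnd := A_idx_bound ys gs a ha
      simp only [entOpt] at hb
      split at hb
      · rcases List.mem_singleton.1 hb with rfl
        simpa using hbnd
      · simp at hb

lemma flatMap_update_perm {α β : Type} (S : List α) (x : α) (f f' : α → List β) (t : List β)
    (hnd : S.Nodup) (hx : x ∈ S) (hne : ∀ a ∈ S, a ≠ x → f' a = f a) (hfx : f' x = f x ++ t) :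
    (S.flatMap f').Perm (S.flatMap f ++ t) := by
  induction S with
  | nil => cases hx
  | cons a S' ih =>
    rcases List.nodup_cons.1 hnd with ⟨haS, hnd'⟩
    rcases List.mem_cons.1 hx with rfl | hxS
    · have hcongr : S'.flatMap f' = S'.flatMap f := by
        rw [List.flatMap_def, List.flatMap_def]
        exact congrArg List.flatten (List.map_congr_left fun b hb =>
          hne b (List.mem_cons_of_mem _ hb) (fun h => haS (h ▸ hb)))
      rw [List.flatMap_cons, List.flatMap_cons, hcongr, hfx,
        List.append_assoc, List.append_assoc]
      exact List.Perm.append_left _ List.perm_append_comm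
    · have hax : a ≠ x := fun h => haS (h ▸ hxS)
      have hfa : f' a = f a := hne a List.mem_cons_self hax
      rw [List.flatMap_cons, List.flatMap_cons, hfa]
      rw [List.append_assoc]
      exact List.Perm.append_left _ (ih hnd' hxS (fun b hb => hne b (List.mem_cons_of_mem _ hb)))

lemma unsortedB_append_singleton (xs gs : List Int) (x : Int) :
    (unsortedB (xs ++ [x]) gs).Perm (unsortedB xs gs ++ entOpt xs gs x) := by
  simp only [unsortedB]
  set f := fun sid => (PySem.List.enumerate ((posOf xs sid).zip (posOf gs sid)) 0).map
    (fun q => (sid, q.1, q.2.1, q.2.2)) with hf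
  set f' := fun sid => (PySem.List.enumerate ((posOf (xs ++ [x]) sid).zip (posOf gs sid)) 0).map
    (fun q => (sid, q.1, q.2.1, q.2.2)) with hf'
  have hne : ∀ a, a ≠ x → f' a = f a := by
    intro a ha
    simp only [hf', hf, posOf_append_singleton]
    rw [if_neg (fun h => ha h.symm), List.append_nil]
  have hfx : f' x = f x ++ entOpt xs gs x := by
    simp only [hf', hf, posOf_append_singleton, entOpt, if_pos]
    rw [zip_append_singleton]
    by_cases hlt : xs.count x < (posOf gs x).length
    · rw [if_pos (by rw [posOf_length]; exact hlt), if_pos hlt,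
        PySem.List.enumerate_append, List.map_append]
      congr 1
      have hz : ((posOf xs x).zip (posOf gs x)).length = xs.count x := by
        rw [List.length_zip, posOf_length]
        exact Nat.min_eq_left (Nat.le_of_lt hlt)
      simp [PySem.List.enumerate_cons, PySem.List.enumerate_nil, hz, posOf_length]
    · rw [if_neg (by rw [posOf_length]; exact hlt), if_neg hlt, List.append_nil, List.append_nil]
  by_cases hx : x ∈ xs
  · rw [PySem.Set.ofList_append_singleton, PySem.Set.add_of_mem ((PySem.Set.mem_ofList _ _).2 hx)]
    exact flatMap_update_perm (PySem.Set.ofList xs) x f f' (entOpt xs gs x)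
      (PySem.Set.nodup_ofList xs) ((PySem.Set.mem_ofList _ _).2 hx)
      (fun a _ ha => hne a ha) hfx
  · rw [PySem.Set.ofList_append_singleton,
      PySem.Set.add_of_not_mem (fun h => hx ((PySem.Set.mem_ofList _ _).1 h)),
      List.flatMap_append, List.flatMap_cons, List.flatMap_nil, List.append_nil]
    have hcongr : (PySem.Set.ofList xs).flatMap f' = (PySem.Set.ofList xs).flatMap f := by
      rw [List.flatMap_def, List.flatMap_def]
      exact congrArg List.flatten (List.map_congr_left fun b hb =>
        hne b (fun h => hx (h ▸ (PySem.Set.mem_ofList _ _).1 hb)))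
    have hfxempty : f x = [] := by
      simp [hf, posOf_of_not_mem xs x hx]
    rw [hcongr, hfx, hfxempty, List.nil_append]

lemma A_perm_unsortedB (xs gs : List Int) :
    (match_pair_positions_py xs gs).Perm (unsortedB xs gs) := by
  induction xs using List.reverseRecOn with
  | nil => simp [match_pair_positions_py, PySem.List.enumerate_nil, unsortedB, PySem.Set.ofList]
  | append_singleton ys y ih =>
    rw [A_append_singleton]
    exact ((ih.append_right _).trans (unsortedB_append_singleton ys gs y).symm).symm.symm

lemma alt_eq_sorted (cs gs : List Int) :
    match_pair_positions_py_alt cs gs = PySem.List.sorted (unsortedB cs gs) (fun m => m.2.2.1) false := by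
  simp only [match_pair_positions_py_alt]
  congr 1
  rw [PySem.List.foldl_append_eq_flatMap, List.nil_append]
  have hnd : (groupPositions cs).keys.Nodup := by
    unfold groupPositions
    exact PySem.Dict.nodup_keys_foldl_modify_key _ _ _ _ _ (by simp)
  have hkeys : (groupPositions cs).keys = PySem.Set.ofList cs := by
    unfold groupPositions
    rw [PySem.Dict.keys_foldl_modify_key]
    simp [PySem.Set.update_nil_left, PySem.List.map_snd_enumerate]
  rw [PySem.Dict.items_eq_map_keys _ hnd ([] : List Int), hkeys]
  unfold unsortedB
  rw [List.flatMap_def, List.flatMap_def, List.map_map]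
  exact congrArg List.flatten (List.map_congr_left fun k _ => by
    simp only [Function.comp]
    rw [group_getD, group_getD])

-- ===== VERDICT (by name: the statement is the Claim_ definition above) =====
theorem match_pair_positions_py_spec : Claim_equal_match_pair_positions_py := by
  intro cs gs _
  show match_pair_positions_py cs gs = match_pair_positions_py_alt cs gs
  rw [alt_eq_sorted]
  symm
  exact PySem.List.sorted_eq_of_perm_of_pairwise_lt _ _ _ (A_perm_unsortedB cs gs) (A_pairwise cs gs)
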